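-- pv_equiv track=rewrite | github.com/wdgonzo/NAOMI-II | src/embeddings/axis_extraction.py | _extract_poles
-- ===== SOURCE A (Python) =====
-- from typing import Dict, List, Set, Optional, Tuple, Any
-- from collections import Counter
--
-- def _extract_poles(member_pairs: List[Dict]) -> Tuple[Set[str], Set[str]]:
--     """
--     Extract positive and negative poles from member pairs (binary fallback).
--
--     Uses frequency-based heuristic: words appearing more often on one side
--     of antonym pairs are assigned to that pole.
--
--     Args:
--         member_pairs: List of antonym pair dicts
--
--     Returns:
--         (positive_pole_words, negative_pole_words)
--     """
--     # Count appearances of each word on each side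
--     word1_counts = Counter()  # Positive pole
--     word2_counts = Counter()  # Negative pole
--
--     for pair in member_pairs:
--         word1_counts[pair['word1']] += 1
--         word2_counts[pair['word2']] += 1
--
--     # Handle words appearing on both sides (ambiguous)
--     all_words_1 = set(word1_counts.keys())
--     all_words_2 = set(word2_counts.keys())
--     ambiguous = all_words_1 & all_words_2
--
--     # Assign ambiguous words to side where they appear more
--     for word in ambiguous:
--         if word1_counts[word] > word2_counts[word]:
--             del word2_counts[word]
--         else:
--             del word1_counts[word]
--
--     positive_pole = set(word1_counts.keys())
--     negative_pole = set(word2_counts.keys())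
--
--     return positive_pole, negative_pole
-- ===== SOURCE B (Python) =====
-- def _extract_poles(member_pairs):
--     """Sort-then-scan: flatten both sides into (word, +1/-1) events, sort by
--     word so each word's events form one contiguous run, then sweep once,
--     summing each run's balance; a positive balance puts the word in the
--     positive pole, otherwise the negative pole."""
--     occ = sorted([(p['word1'], 1) for p in member_pairs] +
--                  [(p['word2'], -1) for p in member_pairs],
--                  key=lambda t: t[0])
--     positive_pole, negative_pole = set(), set()
--     i, n = 0, len(occ)
--     while i < n:
--         word = occ[i][0]
--         balance = 0
--         while i < n and occ[i][0] == word: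
--             balance += occ[i][1]
--             i += 1
--         (positive_pole if balance > 0 else negative_pole).add(word)
--     return positive_pole, negative_pole
-- ===== Notes on version B (the rewrite author's own statement) =====
-- stated objective: alternative
-- what changed: A's two Counters plus a set intersection and a deletion loop are replaced by a sort-then-scan sweep: all occurrences become (word, +1/-1) events, sorted by word, and one pass sums each contiguous run's balance, sending the word to the positive pole iff the balance is positive.
import Mathlib
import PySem

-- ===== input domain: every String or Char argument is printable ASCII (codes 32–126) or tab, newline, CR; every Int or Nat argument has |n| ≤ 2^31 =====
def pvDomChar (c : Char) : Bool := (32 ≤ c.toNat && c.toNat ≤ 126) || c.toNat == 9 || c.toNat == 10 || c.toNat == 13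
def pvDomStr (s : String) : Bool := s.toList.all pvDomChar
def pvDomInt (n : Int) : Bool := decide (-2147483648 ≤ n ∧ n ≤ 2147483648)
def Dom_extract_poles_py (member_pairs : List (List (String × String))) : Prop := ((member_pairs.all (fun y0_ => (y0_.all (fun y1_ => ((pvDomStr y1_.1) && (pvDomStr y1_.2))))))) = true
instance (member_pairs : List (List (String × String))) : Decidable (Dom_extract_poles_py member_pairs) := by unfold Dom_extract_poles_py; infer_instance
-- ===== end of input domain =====

-- B is an alternative algorithm: a sort-then-scan sweep over (word, +1/-1)
-- events replaces A's two Counters + set intersection + deletion loop.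
-- Both functions return Python SETS (no modeled iteration order); both ports
-- represent each returned set canonically as the sorted list of its elements
-- (every consumption of a set's elements here is order-independent).

-- pair[k] : first-match lookup in the dict `pair`; total under Pre_ (key present)
def pyItem (pair : List (String × String)) (k : String) : String :=
  ((PySem.Dict.mk pair).get? k).getD ""

-- ===== PORT A =====
def extract_poles_py (member_pairs : List (List (String × String))) : List String × List String :=
  -- word1_counts / word2_counts: one loop over member_pairs updating both Counters
  let cs := member_pairs.foldl
    (fun cs pair => (cs.1.modify (pyItem pair "word1") 0 (· + 1),
                     cs.2.modify (pyItem pair "word2") 0 (· + 1)))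
    ((PySem.Dict.empty : PySem.Dict String Int), (PySem.Dict.empty : PySem.Dict String Int))
  let all_words_1 := PySem.Set.ofList cs.1.keys
  let all_words_2 := PySem.Set.ofList cs.2.keys
  let ambiguous := PySem.Set.inter all_words_1 all_words_2
  -- deletion loop over the ambiguous set (result is independent of its order)
  let fs := ambiguous.foldl
    (fun cs w => if cs.1.getD w 0 > cs.2.getD w 0 then (cs.1, cs.2.erase w)
                 else (cs.1.erase w, cs.2))
    cs
  (PySem.List.sorted (PySem.Set.ofList fs.1.keys) (fun x => x) false,
   PySem.List.sorted (PySem.Set.ofList fs.2.keys) (fun x => x) false)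

-- ===== PORT B =====
-- the inner while loop of Source B: consume one contiguous run of equal words,
-- sum its balance, classify the word, continue with the rest of the list
def pvRunLoop : List (String × Int) → PySem.Set String → PySem.Set String →
    PySem.Set String × PySem.Set String
  | [], pos, neg => (pos, neg)
  | (w, t) :: rest, pos, neg =>
    let run := rest.takeWhile (fun q => q.1 == w)
    let balance := t + (run.map Prod.snd).sum
    let rest' := rest.dropWhile (fun q => q.1 == w)
    if balance > 0 then pvRunLoop rest' (PySem.Set.add pos w) neg
    else pvRunLoop rest' pos (PySem.Set.add neg w)
  termination_by l _ _ => l.length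
  decreasing_by
    all_goals
      have := List.length_dropWhile_le (fun q => q.1 == w) rest
      simp only [List.length_cons]
      omega

def extract_poles_py_alt (member_pairs : List (List (String × String))) : List String × List String :=
  -- occ = sorted list of (word, +1) / (word, -1) events, key = the word (stable)
  let occ := PySem.List.sorted
    ((member_pairs.map (fun p => (pyItem p "word1", (1 : Int)))) ++
     (member_pairs.map (fun p => (pyItem p "word2", (-1 : Int)))))
    (fun t => t.1) false
  let pn := pvRunLoop occ PySem.Set.empty PySem.Set.empty
  (PySem.List.sorted pn.1 (fun x => x) false, PySem.List.sorted pn.2 (fun x => x) false)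

-- ===== PRECONDITION & SPEC =====
-- Pre_ excludes exactly the inputs where A raises KeyError: a pair missing key 'word1' or 'word2'.
def Pre_extract_poles_py (member_pairs : List (List (String × String))) : Prop :=
  ∀ pair ∈ member_pairs,
    ((PySem.Dict.mk pair).get? "word1").isSome = true ∧
    ((PySem.Dict.mk pair).get? "word2").isSome = true
instance (member_pairs : List (List (String × String))) : Decidable (Pre_extract_poles_py member_pairs) := by
  unfold Pre_extract_poles_py; infer_instance

def pvWitness_extract_poles_py : (List (List (String × String))) :=
  [[("word1", "hot"), ("word2", "cold")], [("word1", "hot"), ("word2", "cold")]]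

def Spec_extract_poles_py (member_pairs : List (List (String × String))) (out : List String × List String) : Prop := out = extract_poles_py_alt member_pairs
instance (member_pairs : List (List (String × String))) (out : List String × List String) : Decidable (Spec_extract_poles_py member_pairs out) := by unfold Spec_extract_poles_py; infer_instance

-- ===== CLAIM (what is proved, stated in full; the proofs are below) =====
def Claim_equal_extract_poles_py : Prop := ∀ (member_pairs : List (List (String × String))), Dom_extract_poles_py member_pairs → Pre_extract_poles_py member_pairs → Spec_extract_poles_py member_pairs (extract_poles_py member_pairs)

-- ===== LEMMAS AND PROOFS =====

-- words on the word1 side / word2 side, with multiplicity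
def pvL1 (member_pairs : List (List (String × String))) : List String :=
  member_pairs.map (fun p => pyItem p "word1")
def pvL2 (member_pairs : List (List (String × String))) : List String :=
  member_pairs.map (fun p => pyItem p "word2")

-- ---- Dict.erase facts (not in the prelude) ----
theorem pv_keys_erase {ν : Type} (d : PySem.Dict String ν) (k : String) :
    (d.erase k).keys = d.keys.filter (fun u => !(u == k)) := by
  simp [PySem.Dict.erase, PySem.Dict.keys, List.filter_map]
  rfl

theorem pv_mem_keys_erase {ν : Type} (d : PySem.Dict String ν) (k u : String) :
    u ∈ (d.erase k).keys ↔ u ∈ d.keys ∧ u ≠ k := by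
  simp [pv_keys_erase, List.mem_filter]

theorem pv_nodup_keys_erase {ν : Type} (d : PySem.Dict String ν) (k : String)
    (h : d.keys.Nodup) : (d.erase k).keys.Nodup := by
  rw [pv_keys_erase]; exact h.filter _

theorem pv_get?_erase_ne {ν : Type} (d : PySem.Dict String ν) (k u : String) (h : u ≠ k) :
    (d.erase k).get? u = d.get? u := by
  obtain ⟨l⟩ := d
  induction l with
  | nil => rfl
  | cons p rest ih =>
    obtain ⟨a, b⟩ := p
    show ({ items := ((a, b) :: rest).filter (fun p => !(p.1 == k)) } : PySem.Dict String ν).get? u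
       = ({ items := (a, b) :: rest } : PySem.Dict String ν).get? u
    rw [List.filter_cons]
    by_cases hak : a = k
    · have h1 : (a == u) = false := by subst hak; simpa using fun e => h e.symm
      simp only [hak, beq_self_eq_true, Bool.not_true, Bool.false_eq_true, if_false]
      have h1' : (k == u) = false := hak ▸ h1
      rw [PySem.Dict.get?_mk_cons, h1']
      simp only [Bool.false_eq_true, if_false]
      simpa [PySem.Dict.erase] using ih
    · have h2 : (!(a == k)) = true := by simp [hak]
      rw [if_pos h2, PySem.Dict.get?_mk_cons, PySem.Dict.get?_mk_cons]
      by_cases hau : (a == u) = true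
      · simp [hau]
      · simp only [Bool.not_eq_true] at hau
        rw [hau]
        simpa [PySem.Dict.erase] using ih

theorem pv_getD_erase_ne {ν : Type} (d : PySem.Dict String ν) (k u : String) (v : ν) (h : u ≠ k) :
    (d.erase k).getD u v = d.getD u v := by
  simp [PySem.Dict.getD_eq_get?_getD, pv_get?_erase_ne d k u h]

-- ---- A's deletion loop, characterized ----
theorem pv_eraseLoop (ws : List String) :
    ∀ d1 d2 : PySem.Dict String Int, ws.Nodup →
    (∀ u, u ∈ (ws.foldl (fun cs w => if cs.1.getD w 0 > cs.2.getD w 0 then (cs.1, cs.2.erase w) else (cs.1.erase w, cs.2)) (d1, d2)).1.keys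
        ↔ u ∈ d1.keys ∧ (u ∉ ws ∨ d1.getD u 0 > d2.getD u 0)) ∧
    (∀ u, u ∈ (ws.foldl (fun cs w => if cs.1.getD w 0 > cs.2.getD w 0 then (cs.1, cs.2.erase w) else (cs.1.erase w, cs.2)) (d1, d2)).2.keys
        ↔ u ∈ d2.keys ∧ (u ∉ ws ∨ ¬ d1.getD u 0 > d2.getD u 0)) ∧
    (d1.keys.Nodup → (ws.foldl (fun cs w => if cs.1.getD w 0 > cs.2.getD w 0 then (cs.1, cs.2.erase w) else (cs.1.erase w, cs.2)) (d1, d2)).1.keys.Nodup) ∧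
    (d2.keys.Nodup → (ws.foldl (fun cs w => if cs.1.getD w 0 > cs.2.getD w 0 then (cs.1, cs.2.erase w) else (cs.1.erase w, cs.2)) (d1, d2)).2.keys.Nodup) := by
  induction ws with
  | nil => intro d1 d2 _; simp
  | cons w ws ih =>
    intro d1 d2 hnd
    obtain ⟨hw, hnd'⟩ := List.nodup_cons.mp hnd
    simp only [List.foldl_cons]
    by_cases hc : d1.getD w 0 > d2.getD w 0
    · rw [if_pos hc]
      obtain ⟨m1, m2, n1, n2⟩ := ih d1 (d2.erase w) hnd'
      refine ⟨?_, ?_, fun h => n1 h, fun h => n2 (pv_nodup_keys_erase _ _ h)⟩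
      · intro u
        rw [m1 u]
        by_cases huw : u = w
        · subst huw; simp [hw, hc]
        · rw [pv_getD_erase_ne d2 w u 0 huw]
          simp [List.mem_cons, huw]
      · intro u
        rw [m2 u, pv_mem_keys_erase]
        by_cases huw : u = w
        · subst huw; simp [hc]
        · rw [pv_getD_erase_ne d2 w u 0 huw]
          simp only [List.mem_cons, huw, false_or, ne_eq, not_false_iff, and_true]
    · rw [if_neg hc]
      obtain ⟨m1, m2, n1, n2⟩ := ih (d1.erase w) d2 hnd'
      refine ⟨?_, ?_, fun h => n1 (pv_nodup_keys_erase _ _ h), fun h => n2 h⟩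
      · intro u
        rw [m1 u, pv_mem_keys_erase]
        by_cases huw : u = w
        · subst huw; simp [hc]
        · rw [pv_getD_erase_ne d1 w u 0 huw]
          simp only [List.mem_cons, huw, false_or, ne_eq, not_false_iff, and_true]
      · intro u
        rw [m2 u]
        by_cases huw : u = w
        · subst huw; simp [hw, hc]
        · rw [pv_getD_erase_ne d1 w u 0 huw]
          simp [List.mem_cons, huw]

-- ---- B's sweep, characterized ----
-- signed multiplicity of u in an event list
def pvTagSum (u : String) (l : List (String × Int)) : Int :=
  ((l.filter (fun q => q.1 == u)).map Prod.snd).sum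

theorem pv_tagSum_nil (u : String) : pvTagSum u [] = 0 := rfl

theorem pv_tagSum_perm (u : String) {l l' : List (String × Int)} (h : l.Perm l') :
    pvTagSum u l = pvTagSum u l' := by
  unfold pvTagSum
  exact ((h.filter _).map _).sum_eq

theorem pv_tagSum_append (u : String) (l l' : List (String × Int)) :
    pvTagSum u (l ++ l') = pvTagSum u l + pvTagSum u l' := by
  simp [pvTagSum]

theorem pv_tagSum_side (L : List String) (c : Int) (u : String) :
    pvTagSum u (L.map (fun w => (w, c))) = c * (L.count u : Int) := by
  induction L with
  | nil => simp [pvTagSum]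
  | cons w L ih =>
    by_cases h : w = u
    · subst h
      simp only [List.map_cons, pvTagSum, List.filter_cons, beq_self_eq_true, if_pos,
        List.map_cons, List.sum_cons, List.count_cons_self]
      unfold pvTagSum at ih
      rw [ih]; push_cast; ring
    · have hb : (w == u) = false := by simpa using h
      simp only [List.map_cons, pvTagSum, List.filter_cons, hb, Bool.false_eq_true, if_false]
      unfold pvTagSum at ih
      rw [ih]
      have : List.count u (w :: L) = List.count u L := by
        simp [List.count_cons, h]
      rw [this]

-- in a word-sorted event list, nothing after the dropped run carries word w
theorem pv_dropWhile_ne (w : String) (rest : List (String × Int))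
    (hhead : ∀ q ∈ rest, w ≤ q.1)
    (hrest : rest.Pairwise (fun a b => a.1 ≤ b.1)) :
    ∀ q ∈ rest.dropWhile (fun q => q.1 == w), q.1 ≠ w := by
  intro q hq
  rcases hre : rest.dropWhile (fun q => q.1 == w) with _ | ⟨d, tl⟩
  · rw [hre] at hq; simp at hq
  · rw [hre] at hq
    have hd : ¬ ((fun q : String × Int => q.1 == w) d = true) := by
      have := List.head?_dropWhile_not (fun q : String × Int => q.1 == w) rest
      rw [hre] at this
      simpa using this
    have hdw : d.1 ≠ w := by simpa using hd
    have hdmem : d ∈ rest := (List.dropWhile_sublist _).mem (hre ▸ List.mem_cons_self ..)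
    have hwd : w ≤ d.1 := hhead d hdmem
    have hps : (d :: tl).Pairwise (fun a b => a.1 ≤ b.1) :=
      hre ▸ hrest.sublist (List.dropWhile_sublist _)
    rcases List.mem_cons.mp hq with rfl | hq'
    · exact hdw
    · have hdq : d.1 ≤ q.1 := (List.pairwise_cons.mp hps).1 q hq'
      intro e
      exact hdw (le_antisymm (e ▸ hdq) hwd |>.symm ▸ rfl)

-- the sweep over a word-sorted event list classifies every word by the sign of
-- its total signed multiplicity
theorem pv_runLoop_char : ∀ (n : Nat) (l : List (String × Int)), l.length ≤ n →
    l.Pairwise (fun a b => a.1 ≤ b.1) → ∀ pos neg : PySem.Set String,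
    (∀ u, u ∈ (pvRunLoop l pos neg).1 ↔ u ∈ pos ∨ (u ∈ l.map Prod.fst ∧ 0 < pvTagSum u l)) ∧
    (∀ u, u ∈ (pvRunLoop l pos neg).2 ↔ u ∈ neg ∨ (u ∈ l.map Prod.fst ∧ ¬ 0 < pvTagSum u l)) ∧
    (List.Nodup pos → List.Nodup (pvRunLoop l pos neg).1) ∧
    (List.Nodup neg → List.Nodup (pvRunLoop l pos neg).2) := by
  intro n
  induction n with
  | zero =>
    intro l hl _ pos neg
    have : l = [] := List.eq_nil_of_length_eq_zero (Nat.le_zero.mp hl)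
    subst this
    simp [pvRunLoop, pv_tagSum_nil]
  | succ n ih =>
    intro l hl hs pos neg
    match l with
    | [] => simp [pvRunLoop, pv_tagSum_nil]
    | (w, t) :: rest =>
      obtain ⟨hhead, hrest⟩ := List.pairwise_cons.mp hs
      set run := rest.takeWhile (fun q => q.1 == w) with hrun
      set rest' := rest.dropWhile (fun q => q.1 == w) with hrest'
      have hsplit : run ++ rest' = rest := List.takeWhile_append_dropWhile
      -- every element of the run has word w
      have hrunw : ∀ q ∈ run, q.1 = w := by
        intro q hq
        have := List.mem_takeWhile_imp hq
        simpa using this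
      -- no element of rest' has word w
      have hrest'w : ∀ q ∈ rest', q.1 ≠ w :=
        pv_dropWhile_ne w rest (fun q hq => hhead q hq) hrest
      have hwrest' : w ∉ rest'.map Prod.fst := by
        intro hmem
        obtain ⟨q, hq, he⟩ := List.mem_map.mp hmem
        exact hrest'w q hq he
      -- balance = signed multiplicity of w in the whole list
      have hbal : t + (run.map Prod.snd).sum = pvTagSum w ((w, t) :: rest) := by
        have hfr : run.filter (fun q => q.1 == w) = run := by
          apply List.filter_eq_self.mpr
          intro q hq; simpa using hrunw q hq
        have hfr' : rest'.filter (fun q => q.1 == w) = [] := by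
          apply List.filter_eq_nil_iff.mpr
          intro q hq; simpa using hrest'w q hq
        rw [show ((w, t) :: rest) = ((w, t) :: run) ++ rest' by rw [← hsplit]; rfl]
        rw [pv_tagSum_append]
        unfold pvTagSum
        rw [hfr']
        simp [hfr]
      -- for u ≠ w the tail rest' carries the same signed multiplicity
      have htag : ∀ u, u ≠ w → pvTagSum u ((w, t) :: rest) = pvTagSum u rest' := by
        intro u hu
        rw [show ((w, t) :: rest) = ((w, t) :: run) ++ rest' by rw [← hsplit]; rfl,
          pv_tagSum_append]
        have hfr : ((w, t) :: run).filter (fun q => q.1 == u) = [] := by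
          apply List.filter_eq_nil_iff.mpr
          intro q hq
          rcases List.mem_cons.mp hq with rfl | hq'
          · simpa using fun e => hu e.symm
          · rw [hrunw q hq']; simpa using fun e => hu e.symm
        unfold pvTagSum
        rw [hfr]; simp
      have hmem' : ∀ u, u ≠ w → (u ∈ ((w, t) :: rest).map Prod.fst ↔ u ∈ rest'.map Prod.fst) := by
        intro u hu
        rw [show ((w, t) :: rest) = ((w, t) :: run) ++ rest' by rw [← hsplit]; rfl]
        simp only [List.map_append, List.mem_append, List.map_cons, List.mem_cons]
        constructor
        · rintro (h | h)
          · rcases h with h | h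
            · exact absurd h hu
            · obtain ⟨q, hq, he⟩ := List.mem_map.mp h
              exact absurd (he ▸ hrunw q hq) hu
          · exact h
        · exact fun h => Or.inr h
      have hlen : rest'.length ≤ n := by
        have h1 := List.length_dropWhile_le (fun q => q.1 == w) rest
        have h2 : rest.length + 1 ≤ n + 1 := by simpa using hl
        rw [← hrest'] at h1; omega
      have hsort' : rest'.Pairwise (fun a b => a.1 ≤ b.1) :=
        hrest.sublist (List.dropWhile_sublist _)
      have hwl : w ∈ ((w, t) :: rest).map Prod.fst := by simp
      by_cases hc : t + (run.map Prod.snd).sum > 0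
      · have hstep : pvRunLoop ((w, t) :: rest) pos neg
            = pvRunLoop rest' (PySem.Set.add pos w) neg := by
          rw [pvRunLoop]; simp only [← hrun, ← hrest', if_pos hc]
        obtain ⟨m1, m2, n1, n2⟩ := ih rest' hlen hsort' (PySem.Set.add pos w) neg
        rw [hstep]
        refine ⟨?_, ?_, fun h => n1 (PySem.Set.nodup_add _ _ h), n2⟩
        · intro u
          rw [m1 u, PySem.Set.mem_add]
          by_cases hu : u = w
          · subst hu
            have hpos : 0 < pvTagSum u ((u, t) :: rest) := hbal ▸ hc
            simp [hwrest', hpos]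
          · rw [htag u hu, hmem' u hu]
            simp [hu]
        · intro u
          rw [m2 u]
          by_cases hu : u = w
          · subst hu
            have hpos : 0 < pvTagSum u ((u, t) :: rest) := hbal ▸ hc
            simp [hwrest', hpos]
          · rw [htag u hu, hmem' u hu]
      · have hstep : pvRunLoop ((w, t) :: rest) pos neg
            = pvRunLoop rest' pos (PySem.Set.add neg w) := by
          rw [pvRunLoop]; simp only [← hrun, ← hrest', if_neg hc]
        obtain ⟨m1, m2, n1, n2⟩ := ih rest' hlen hsort' pos (PySem.Set.add neg w)
        rw [hstep]
        refine ⟨?_, ?_, n1, fun h => n2 (PySem.Set.nodup_add _ _ h)⟩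
        · intro u
          rw [m1 u]
          by_cases hu : u = w
          · subst hu
            have hnpos : ¬ 0 < pvTagSum u ((u, t) :: rest) := hbal ▸ hc
            simp [hwrest', hnpos]
          · rw [htag u hu, hmem' u hu]
        · intro u
          rw [m2 u, PySem.Set.mem_add]
          by_cases hu : u = w
          · subst hu
            have hnpos : ¬ 0 < pvTagSum u ((u, t) :: rest) := hbal ▸ hc
            simp [hwrest', hnpos]
          · rw [htag u hu, hmem' u hu]
            simp [hu]

-- ===== VERDICT (by name: the statement is the Claim_ definition above) =====
theorem extract_poles_py_spec : Claim_equal_extract_poles_py := by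
  intro mp _ _
  show extract_poles_py mp = extract_poles_py_alt mp
  have hA : (mp.foldl (fun cs pair => (cs.1.modify (pyItem pair "word1") 0 (· + 1),
                     cs.2.modify (pyItem pair "word2") 0 (· + 1)))
      ((PySem.Dict.empty : PySem.Dict String Int), (PySem.Dict.empty : PySem.Dict String Int)))
      = (PySem.Dict.counter (pvL1 mp), PySem.Dict.counter (pvL2 mp)) := by
    have h := PySem.List.foldl_prod_mk
      (fun (d : PySem.Dict String Int) (pair : List (String × String)) => d.modify (pyItem pair "word1") 0 (· + 1))
      (fun (d : PySem.Dict String Int) (pair : List (String × String)) => d.modify (pyItem pair "word2") 0 (· + 1))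
      mp PySem.Dict.empty PySem.Dict.empty
    rw [h]
    unfold PySem.Dict.counter pvL1 pvL2
    rw [List.foldl_map, List.foldl_map]
  simp only [extract_poles_py, extract_poles_py_alt]
  rw [hA]
  dsimp only
  set c1 := PySem.Dict.counter (pvL1 mp) with hc1
  set c2 := PySem.Dict.counter (pvL2 mp) with hc2
  set amb := PySem.Set.inter (PySem.Set.ofList c1.keys) (PySem.Set.ofList c2.keys) with hamb
  set fs := amb.foldl (fun cs w => if cs.1.getD w 0 > cs.2.getD w 0 then (cs.1, cs.2.erase w) else (cs.1.erase w, cs.2)) (c1, c2) with hfs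
  set occ0 := (mp.map (fun p => (pyItem p "word1", (1 : Int)))) ++ (mp.map (fun p => (pyItem p "word2", (-1 : Int)))) with hocc0
  set occ := PySem.List.sorted occ0 (fun t => t.1) false with hocc
  set pn := pvRunLoop occ PySem.Set.empty PySem.Set.empty with hpn
  -- the ambiguous set
  have hambnd : amb.Nodup := PySem.Set.nodup_inter _ _ (PySem.Set.nodup_ofList _)
  have hambmem : ∀ u, u ∈ amb ↔ u ∈ pvL1 mp ∧ u ∈ pvL2 mp := by
    intro u
    rw [hamb, PySem.Set.mem_inter]
    simp [PySem.Set.mem_ofList, hc1, hc2, PySem.Dict.keys_counter]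
  obtain ⟨mA1, mA2, nA1, nA2⟩ := pv_eraseLoop amb c1 c2 hambnd
  rw [← hfs] at mA1 mA2 nA1 nA2
  -- A's poles, characterized by side counts
  have hA1 : ∀ u, u ∈ fs.1.keys ↔ List.count u (pvL2 mp) < List.count u (pvL1 mp) := by
    intro u
    rw [mA1 u, hambmem u, hc1, hc2, PySem.Dict.keys_counter, PySem.Dict.getD_counter,
      PySem.Dict.getD_counter]
    simp only [PySem.Set.mem_ofList, gt_iff_lt, Nat.cast_lt]
    constructor
    · rintro ⟨h1, h | h⟩
      · have h2 : u ∉ pvL2 mp := fun hm => h ⟨h1, hm⟩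
        have hp := List.count_pos_iff.mpr h1
        have hz := List.count_eq_zero.mpr h2
        omega
      · exact h
    · intro h
      exact ⟨List.count_pos_iff.mp (by omega), Or.inr h⟩
  have hA2 : ∀ u, u ∈ fs.2.keys ↔ u ∈ pvL2 mp ∧ List.count u (pvL1 mp) ≤ List.count u (pvL2 mp) := by
    intro u
    rw [mA2 u, hambmem u, hc1, hc2, PySem.Dict.keys_counter, PySem.Dict.getD_counter,
      PySem.Dict.getD_counter]
    simp only [PySem.Set.mem_ofList, gt_iff_lt, not_lt, Nat.cast_le]
    constructor
    · rintro ⟨h2, h | h⟩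
      · have h1 : u ∉ pvL1 mp := fun hm => h ⟨hm, h2⟩
        have hz := List.count_eq_zero.mpr h1
        exact ⟨h2, by omega⟩
      · exact ⟨h2, h⟩
    · rintro ⟨h2, h⟩
      exact ⟨h2, Or.inr h⟩
  have ndA1 : fs.1.keys.Nodup := nA1 (by rw [hc1]; exact PySem.Dict.nodup_keys_counter _)
  have ndA2 : fs.2.keys.Nodup := nA2 (by rw [hc2]; exact PySem.Dict.nodup_keys_counter _)
  -- B's sweep: sortedness, permutation, signed multiplicity
  have hperm : occ.Perm occ0 := PySem.List.sorted_perm _ _ _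
  have hsort : occ.Pairwise (fun a b => a.1 ≤ b.1) :=
    PySem.List.sorted_pairwise occ0 (fun t : String × Int => t.1)
  have htag0 : ∀ u, pvTagSum u occ0 = (List.count u (pvL1 mp) : Int) - List.count u (pvL2 mp) := by
    intro u
    rw [hocc0, pv_tagSum_append]
    have e1 : (mp.map (fun p => (pyItem p "word1", (1 : Int))))
        = (pvL1 mp).map (fun w => (w, (1 : Int))) := by
      simp [pvL1, List.map_map]
    have e2 : (mp.map (fun p => (pyItem p "word2", (-1 : Int))))
        = (pvL2 mp).map (fun w => (w, (-1 : Int))) := by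
      simp [pvL2, List.map_map]
    rw [e1, e2, pv_tagSum_side, pv_tagSum_side]
    ring
  have htag : ∀ u, pvTagSum u occ = (List.count u (pvL1 mp) : Int) - List.count u (pvL2 mp) := by
    intro u; rw [pv_tagSum_perm u hperm, htag0 u]
  have hmemocc : ∀ u, u ∈ occ.map Prod.fst ↔ u ∈ pvL1 mp ∨ u ∈ pvL2 mp := by
    intro u
    rw [(hperm.map Prod.fst).mem_iff, hocc0]
    simp [pvL1, pvL2, List.map_map]
  obtain ⟨mB1, mB2, nB1, nB2⟩ := pv_runLoop_char occ.length occ le_rfl hsort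
    PySem.Set.empty PySem.Set.empty
  rw [← hpn] at mB1 mB2 nB1 nB2
  have hB1 : ∀ u, u ∈ pn.1 ↔ List.count u (pvL2 mp) < List.count u (pvL1 mp) := by
    intro u
    rw [mB1 u, hmemocc u, htag u]
    simp only [PySem.Set.empty, List.not_mem_nil, false_or]
    constructor
    · rintro ⟨_, h⟩; omega
    · intro h
      exact ⟨Or.inl (List.count_pos_iff.mp (by omega)), by omega⟩
  have hB2 : ∀ u, u ∈ pn.2 ↔ u ∈ pvL2 mp ∧ List.count u (pvL1 mp) ≤ List.count u (pvL2 mp) := by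
    intro u
    rw [mB2 u, hmemocc u, htag u]
    simp only [PySem.Set.empty, List.not_mem_nil, false_or, not_lt]
    constructor
    · rintro ⟨h1 | h2, h⟩
      · have hp := List.count_pos_iff.mpr h1
        exact ⟨List.count_pos_iff.mp (by omega), by omega⟩
      · exact ⟨h2, by omega⟩
    · rintro ⟨h2, h⟩
      exact ⟨Or.inr h2, by omega⟩
  have ndB1 : pn.1.Nodup := nB1 (by simp [PySem.Set.empty])
  have ndB2 : pn.2.Nodup := nB2 (by simp [PySem.Set.empty])
  -- both sides are the same set, so the sorted representations agree
  rw [PySem.Set.ofList_eq_self_of_nodup _ ndA1, PySem.Set.ofList_eq_self_of_nodup _ ndA2]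
  have p1 : (fs.1.keys).Perm pn.1 :=
    (List.perm_ext_iff_of_nodup ndA1 ndB1).mpr (fun u => (hA1 u).trans (hB1 u).symm)
  have p2 : (fs.2.keys).Perm pn.2 :=
    (List.perm_ext_iff_of_nodup ndA2 ndB2).mpr (fun u => (hA2 u).trans (hB2 u).symm)
  rw [PySem.List.sorted_eq_sorted_of_perm _ _ _ (fun _ _ h => h) p1,
      PySem.List.sorted_eq_sorted_of_perm _ _ _ (fun _ _ h => h) p2]
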